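-- pv_equiv track=rewrite | github.com/AlgoritmiNarvik/SaMuGeD-Algoritmi-DrDreSamplerAI-2024 | testing_tools/test_scripts/almaz_scripts/PatternSegmentationNgrams.py | detect_silence
-- ===== SOURCE A (Python) =====
-- def detect_silence(track, silence_threshold):
--     silent_regions = []
--     start = None
--     for i, note in enumerate(track):
--         if note[3] < silence_threshold:  # Using velocity as a proxy for silence
--             if start is None:
--                 start = note[1]
--         elif start is not None:
--             silent_regions.append((start, note[1]))
--             start = None
--     return silent_regions
-- ===== SOURCE B (Python) =====
-- from itertools import groupby
--
-- def detect_silence(track, silence_threshold):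
--     groups = [(is_silent, list(members))
--               for is_silent, members in
--               groupby(track, key=lambda note: note[3] < silence_threshold)]
--     regions = []
--     for i, (is_silent, members) in enumerate(groups):
--         if is_silent and i + 1 < len(groups):
--             regions.append((members[0][1], groups[i + 1][1][0][1]))
--     return regions
-- ===== Notes on version B (the rewrite author's own statement) =====
-- stated objective: alternative
-- what changed: Replaces A's single-pass state machine (start sentinel carried across the loop) by itertools.groupby over the silence flag followed by a pairwise pass over adjacent groups; a trailing silent run is dropped because the last group has no successor.
import Mathlib
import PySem

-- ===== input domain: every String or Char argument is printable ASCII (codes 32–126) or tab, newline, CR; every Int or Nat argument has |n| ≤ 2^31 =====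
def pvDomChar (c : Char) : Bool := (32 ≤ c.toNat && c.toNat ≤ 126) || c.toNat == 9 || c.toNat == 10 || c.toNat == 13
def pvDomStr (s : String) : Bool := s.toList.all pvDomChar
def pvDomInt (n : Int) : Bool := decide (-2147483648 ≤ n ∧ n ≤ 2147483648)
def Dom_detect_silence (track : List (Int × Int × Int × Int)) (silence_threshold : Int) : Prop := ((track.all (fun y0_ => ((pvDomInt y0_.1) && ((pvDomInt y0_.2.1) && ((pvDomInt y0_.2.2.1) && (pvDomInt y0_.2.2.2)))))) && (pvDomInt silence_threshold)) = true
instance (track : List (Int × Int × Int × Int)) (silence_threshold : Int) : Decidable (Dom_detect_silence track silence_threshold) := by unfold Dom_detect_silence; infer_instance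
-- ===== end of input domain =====

-- B replaces A's one-pass state machine by groupby-on-the-silence-flag plus a
-- pairwise pass over adjacent groups (objective: alternative decomposition).

-- ===== PORT A =====
-- A's loop: state = (silent_regions, start); one step per note, branches in A's order.
def detectSilenceLoop (silence_threshold : Int) :
    List (Int × Int × Int × Int) → List (Int × Int) → Option Int → List (Int × Int)
  | [], acc, _ => acc
  | note :: rest, acc, start =>
    if note.2.2.2 < silence_threshold then
      match start with
      | none => detectSilenceLoop silence_threshold rest acc (some note.2.1)
      | some _ => detectSilenceLoop silence_threshold rest acc start
    else
      match start with
      | some a => detectSilenceLoop silence_threshold rest (acc ++ [(a, note.2.1)]) none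
      | none => detectSilenceLoop silence_threshold rest acc none

def detect_silence (track : List (Int × Int × Int × Int)) (silence_threshold : Int) : List (Int × Int) :=
  detectSilenceLoop silence_threshold track [] none

-- ===== PORT B =====
-- itertools.groupby on the key note[3] < silence_threshold: maximal runs of equal key,
-- each group materialised as (key, first member, remaining members).
def groupRuns (silence_threshold : Int) :
    List (Int × Int × Int × Int) → List (Bool × (Int × Int × Int × Int) × List (Int × Int × Int × Int))
  | [] => []
  | note :: rest =>
    let k := decide (note.2.2.2 < silence_threshold)
    match groupRuns silence_threshold rest with
    | (k', m, g) :: gs =>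
      if k = k' then (k, note, m :: g) :: gs else (k, note, []) :: (k', m, g) :: gs
    | [] => [(k, note, [])]

-- pairwise pass: a silent group followed by some group emits one region.
def emitRegions :
    List (Bool × (Int × Int × Int × Int) × List (Int × Int × Int × Int)) → List (Int × Int)
  | (true, n1, _) :: (k2, n2, g2) :: gs => (n1.2.1, n2.2.1) :: emitRegions ((k2, n2, g2) :: gs)
  | _ :: gs => emitRegions gs
  | [] => []

def detect_silence_alt (track : List (Int × Int × Int × Int)) (silence_threshold : Int) : List (Int × Int) :=
  emitRegions (groupRuns silence_threshold track)

-- ===== PRECONDITION & SPEC =====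
def Spec_detect_silence (track : List (Int × Int × Int × Int)) (silence_threshold : Int) (out : List (Int × Int)) : Prop := out = detect_silence_alt track silence_threshold
instance (track : List (Int × Int × Int × Int)) (silence_threshold : Int) (out : List (Int × Int)) : Decidable (Spec_detect_silence track silence_threshold out) := by unfold Spec_detect_silence; infer_instance

-- ===== CLAIM (what is proved, stated in full; the proofs are below) =====
def Claim_equal_detect_silence : Prop := ∀ (track : List (Int × Int × Int × Int)) (silence_threshold : Int), Dom_detect_silence track silence_threshold → Spec_detect_silence track silence_threshold (detect_silence track silence_threshold)

-- ===== LEMMAS AND PROOFS =====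

-- Value of the remaining computation of A's loop, expressed on B's group list:
-- with start = none it is exactly B's pairwise pass; with start = some a the current
-- silent run is open and ends at the first note of the next non-silent group.
def loopOnGroups : Option Int →
    List (Bool × (Int × Int × Int × Int) × List (Int × Int × Int × Int)) → List (Int × Int)
  | none, gs => emitRegions gs
  | some _, [] => []
  | some a, (true, _, _) :: gs =>
    match gs with
    | [] => []
    | (_, n2, _) :: _ => (a, n2.2.1) :: emitRegions gs
  | some a, (false, n, _) :: gs => (a, n.2.1) :: emitRegions gs

theorem detectSilenceLoop_eq (t : Int) (track : List (Int × Int × Int × Int)) :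
    ∀ (acc : List (Int × Int)) (start : Option Int),
      detectSilenceLoop t track acc start = acc ++ loopOnGroups start (groupRuns t track) := by
  induction track with
  | nil =>
    intro acc start
    cases start <;> simp [detectSilenceLoop, groupRuns, loopOnGroups, emitRegions]
  | cons note rest ih =>
    intro acc start
    by_cases h : note.2.2.2 < t
    · cases start with
      | none =>
        rw [detectSilenceLoop, if_pos h, ih]
        rcases hg : groupRuns t rest with _ | ⟨⟨k', m, g⟩, gs⟩ <;>
          simp [groupRuns, hg, h, loopOnGroups, emitRegions] <;>
          cases k' <;>
          simp [loopOnGroups, emitRegions] <;>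
          rcases gs with _ | ⟨⟨k2, n2, g2⟩, gs'⟩ <;>
          simp [loopOnGroups, emitRegions]
      | some a =>
        rw [detectSilenceLoop, if_pos h, ih]
        rcases hg : groupRuns t rest with _ | ⟨⟨k', m, g⟩, gs⟩ <;>
          simp [groupRuns, hg, h, loopOnGroups, emitRegions] <;>
          cases k' <;>
          simp [loopOnGroups, emitRegions]
    · cases start with
      | none =>
        rw [detectSilenceLoop, if_neg h, ih]
        rcases hg : groupRuns t rest with _ | ⟨⟨k', m, g⟩, gs⟩ <;>
          simp [groupRuns, hg, h, loopOnGroups, emitRegions] <;>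
          cases k' <;>
          simp [loopOnGroups, emitRegions]
      | some a =>
        rw [detectSilenceLoop, if_neg h, ih]
        rcases hg : groupRuns t rest with _ | ⟨⟨k', m, g⟩, gs⟩ <;>
          simp [groupRuns, hg, h, loopOnGroups, emitRegions] <;>
          cases k' <;>
          simp [loopOnGroups, emitRegions]

-- ===== VERDICT (by name: the statement is the Claim_ definition above) =====
theorem detect_silence_spec : Claim_equal_detect_silence := by
  intro track t _
  unfold Spec_detect_silence detect_silence detect_silence_alt
  rw [detectSilenceLoop_eq]
  simp [loopOnGroups]
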